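-- pv_equiv track=rewrite | github.com/SarathSrikakula/kite-callback | main1.py | process_purple_markers
-- ===== SOURCE A (Python) =====
-- def process_purple_markers(purple_ys, gap_threshold=1):
--     """
--     Groups y-coordinates into clusters and returns midpoints for each.
--     gap_threshold: minimum distance between two separate dotted lines.
--     """
--     if not purple_ys: return []
--
--     clusters = []
--     if purple_ys:
--         current_cluster = [purple_ys[0]]
--         for i in range(1, len(purple_ys)):
--             if purple_ys[i] - purple_ys[i - 1] <= gap_threshold:
--                 current_cluster.append(purple_ys[i])
--             else:
--                 clusters.append(current_cluster)
--                 current_cluster = [purple_ys[i]]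
--                 current_group = [purple_ys[i]]
--         clusters.append(current_cluster)
--
--     # Calculate midpoints for each identified cluster
--     mid_points = [(c[0] + c[-1]) // 2 for c in clusters]
--     return mid_points
-- ===== SOURCE B (Python) =====
-- def process_purple_markers(purple_ys, gap_threshold=1):
--     """
--     Groups y-coordinates into clusters and returns midpoints for each.
--     gap_threshold: minimum distance between two separate dotted lines.
--     """
--     if not purple_ys: return []
--     n = len(purple_ys)
--     # Pass 1: indices where a new cluster begins, plus the two ends.
--     bounds = [0] + [i for i in range(1, n)
--                     if purple_ys[i] - purple_ys[i - 1] > gap_threshold] + [n]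
--     # Pass 2: one midpoint per segment [bounds[k], bounds[k+1]).
--     return [(purple_ys[bounds[k]] + purple_ys[bounds[k + 1] - 1]) // 2
--             for k in range(len(bounds) - 1)]
-- ===== Notes on version B (the rewrite author's own statement) =====
-- stated objective: alternative
-- what changed: A accumulates explicit cluster lists while scanning and then maps midpoints over them; B never materializes clusters: it first computes the segment boundary indices (where the gap exceeds the threshold) and then produces one midpoint per consecutive boundary pair by indexing, so no per-element cluster lists are built.
import Mathlib
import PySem

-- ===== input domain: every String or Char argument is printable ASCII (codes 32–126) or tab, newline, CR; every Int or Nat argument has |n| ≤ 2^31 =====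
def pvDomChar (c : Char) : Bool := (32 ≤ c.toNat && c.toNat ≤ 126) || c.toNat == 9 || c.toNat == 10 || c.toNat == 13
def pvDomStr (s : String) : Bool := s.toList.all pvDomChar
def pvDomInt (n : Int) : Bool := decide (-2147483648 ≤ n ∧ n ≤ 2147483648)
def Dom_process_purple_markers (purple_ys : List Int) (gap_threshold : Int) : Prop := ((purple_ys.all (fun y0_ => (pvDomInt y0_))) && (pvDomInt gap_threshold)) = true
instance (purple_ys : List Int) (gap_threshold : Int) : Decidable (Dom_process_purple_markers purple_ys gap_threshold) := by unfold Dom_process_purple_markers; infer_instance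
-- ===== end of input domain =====

-- B replaces A's cluster-accumulating scan by index-based segmentation (boundary
-- indices first, then one midpoint per segment); objective: alternative decomposition.

-- ===== PORT A =====
-- Literal port of A. The inner `if purple_ys:` is always true after the early
-- return and the assignment to the unused `current_group` has no effect; both are
-- omitted. Loop state is the pair (clusters, current_cluster).
def process_purple_markers (purple_ys : List Int) (gap_threshold : Int) : List Int :=
  if purple_ys = [] then []
  else
    let st := (PySem.List.pyRange 1 (purple_ys.length : Int) 1).foldl
      (fun (st : List (List Int) × List Int) i =>
        if PySem.List.pyGetD purple_ys i 0 - PySem.List.pyGetD purple_ys (i - 1) 0 ≤ gap_threshold then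
          (st.1, st.2 ++ [PySem.List.pyGetD purple_ys i 0])
        else
          (st.1 ++ [st.2], [PySem.List.pyGetD purple_ys i 0]))
      (([] : List (List Int)), [PySem.List.pyGetD purple_ys 0 0])
    (st.1 ++ [st.2]).map
      (fun c => PySem.Int.floordiv (PySem.List.pyGetD c 0 0 + PySem.List.pyGetD c (-1) 0) 2)

-- ===== PORT B =====
def process_purple_markers_alt (purple_ys : List Int) (gap_threshold : Int) : List Int :=
  if purple_ys = [] then []
  else
    let n : Int := purple_ys.length
    let bounds : List Int :=
      (0 :: (PySem.List.pyRange 1 n 1).filter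
        (fun i => decide (gap_threshold <
          PySem.List.pyGetD purple_ys i 0 - PySem.List.pyGetD purple_ys (i - 1) 0))) ++ [n]
    (PySem.List.pyRange 0 ((bounds.length : Int) - 1) 1).map
      (fun k => PySem.Int.floordiv
        (PySem.List.pyGetD purple_ys (PySem.List.pyGetD bounds k 0) 0
          + PySem.List.pyGetD purple_ys (PySem.List.pyGetD bounds (k + 1) 0 - 1) 0) 2)

-- ===== PRECONDITION & SPEC =====
def Spec_process_purple_markers (purple_ys : List Int) (gap_threshold : Int) (out : List Int) : Prop := out = process_purple_markers_alt purple_ys gap_threshold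
instance (purple_ys : List Int) (gap_threshold : Int) (out : List Int) : Decidable (Spec_process_purple_markers purple_ys gap_threshold out) := by unfold Spec_process_purple_markers; infer_instance

-- ===== CLAIM (what is proved, stated in full; the proofs are below) =====
def Claim_equal_process_purple_markers : Prop := ∀ (purple_ys : List Int) (gap_threshold : Int), Dom_process_purple_markers purple_ys gap_threshold → Spec_process_purple_markers purple_ys gap_threshold (process_purple_markers purple_ys gap_threshold)

-- ===== LEMMAS AND PROOFS =====

-- Common specification: walk the tail, keeping the first (`start`) and last
-- (`prev`) element of the open cluster, emitting floor midpoints.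
def goSpec (g start prev : Int) : List Int → List Int
  | [] => [PySem.Int.floordiv (start + prev) 2]
  | y :: t =>
    if y - prev ≤ g then goSpec g start y t
    else PySem.Int.floordiv (start + prev) 2 :: goSpec g y y t

-- recursion on consecutive pairs of a list
def pairMap (f : Int → Int → Int) : List Int → List Int
  | b1 :: b2 :: bs => f b1 b2 :: pairMap f (b2 :: bs)
  | _ => []

theorem pyGetD_neg_one (c : List Int) (x : Int) (h : c.getLast? = some x) :
    PySem.List.pyGetD c (-1) 0 = x := by
  have hne : c ≠ [] := by rintro rfl; simp at h
  have h1 : 1 ≤ c.length := List.length_pos_iff.mpr hne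
  have hidx : getElem? c (c.length - 1) = some x := by
    rw [← List.getLast?_eq_getElem?]; exact h
  simp only [PySem.List.pyGetD, PySem.List.pyGet?, PySem.List.pyIdx?]
  rw [if_neg (by omega), if_pos (by omega)]
  simp [hidx]

theorem pyGetD_head (c : List Int) (x : Int) (h : c.head? = some x) :
    PySem.List.pyGetD c 0 0 = x := by
  cases c with
  | nil => simp at h
  | cons a t =>
    simp only [List.head?_cons, Option.some.injEq] at h
    simp [PySem.List.pyGetD_ofNat', h]

theorem getD_of_drop (ys : List Int) (k : Nat) (y : Int) (t : List Int)
    (h : ys.drop k = y :: t) : ys.getD k 0 = y := by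
  have : getElem? ys k = some y := by
    rw [← List.head?_drop, h]; rfl
  simp [List.getD, this]

theorem length_of_drop_cons (ys : List Int) (k : Nat) (y : Int) (t : List Int)
    (h : ys.drop k = y :: t) : k < ys.length := by
  have := congrArg List.length h
  simp at this
  omega

-- A's loop, generalized: state (cl, cur) with cur's head `start`, cur's last
-- `prev` = ys[k-1]; the remaining indices k..len ys index the tail `t`.
theorem A_loop (g : Int) (ys : List Int) :
    ∀ (t : List Int) (k : Nat), 1 ≤ k → ys.drop k = t →
    ∀ (cl : List (List Int)) (cur : List Int) (start prev : Int),
      cur.head? = some start → cur.getLast? = some prev → ys.getD (k - 1) 0 = prev →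
      (let st := (PySem.List.pyRange (k : Int) (ys.length : Int) 1).foldl
        (fun (st : List (List Int) × List Int) i =>
          if PySem.List.pyGetD ys i 0 - PySem.List.pyGetD ys (i - 1) 0 ≤ g then
            (st.1, st.2 ++ [PySem.List.pyGetD ys i 0])
          else
            (st.1 ++ [st.2], [PySem.List.pyGetD ys i 0])) (cl, cur)
       (st.1 ++ [st.2]).map
        (fun c => PySem.Int.floordiv (PySem.List.pyGetD c 0 0 + PySem.List.pyGetD c (-1) 0) 2))
      = cl.map (fun c => PySem.Int.floordiv (PySem.List.pyGetD c 0 0 + PySem.List.pyGetD c (-1) 0) 2)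
        ++ goSpec g start prev t := by
  intro t
  induction t with
  | nil =>
    intro k hk hdrop cl cur start prev hh hl hprev
    have hlen : ys.length ≤ k := by
      have := congrArg List.length hdrop
      simp at this
      omega
    rw [PySem.List.pyRange_one_eq_nil (by exact_mod_cast hlen)]
    simp only [List.foldl_nil, List.map_append, List.map_cons, List.map_nil, goSpec]
    rw [pyGetD_neg_one cur prev hl, pyGetD_head cur start hh]
  | cons y t' ih =>
    intro k hk hdrop cl cur start prev hh hl hprev
    have hklt : k < ys.length := length_of_drop_cons ys k y t' hdrop
    rw [PySem.List.pyRange_one_cons (by exact_mod_cast hklt)]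
    have hyk : PySem.List.pyGetD ys (k : Int) 0 = y := by
      rw [PySem.List.pyGetD_natCast]; exact getD_of_drop ys k y t' hdrop
    have hykm : PySem.List.pyGetD ys ((k : Int) - 1) 0 = prev := by
      have : (k : Int) - 1 = ((k - 1 : Nat) : Int) := by omega
      rw [this, PySem.List.pyGetD_natCast]; exact hprev
    have hdrop' : ys.drop (k + 1) = t' := by
      rw [← List.drop_drop, hdrop]; rfl
    have hkc : (k : Int) + 1 = ((k + 1 : Nat) : Int) := by omega
    have hcne : cur ≠ [] := by intro h; subst h; simp at hh
    simp only [List.foldl_cons, hyk, hykm]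
    by_cases hc : y - prev ≤ g
    · rw [if_pos hc, hkc]
      rw [ih (k + 1) (by omega) hdrop' cl (cur ++ [y]) start y
        (by rw [List.head?_append_of_ne_nil _ hcne]; exact hh)
        (List.getLast?_concat)
        (by simpa using getD_of_drop ys k y t' hdrop)]
      simp only [goSpec, if_pos hc]
    · rw [if_neg hc, hkc]
      rw [ih (k + 1) (by omega) hdrop' (cl ++ [cur]) [y] y y
        (by rfl) (by rfl)
        (by simpa using getD_of_drop ys k y t' hdrop)]
      simp only [List.map_append, List.map_cons, List.map_nil, goSpec, if_neg hc]
      rw [pyGetD_neg_one cur prev hl, pyGetD_head cur start hh]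
      rw [List.append_assoc]
      rfl

-- B's boundary list, consumed pairwise, also computes goSpec.
theorem B_loop (g : Int) (ys : List Int) :
    ∀ (t : List Int) (k : Nat), 1 ≤ k → k ≤ ys.length → ys.drop k = t →
    ∀ (b : Nat) (start prev : Int), ys.getD b 0 = start → ys.getD (k - 1) 0 = prev →
      pairMap (fun b1 b2 => PySem.Int.floordiv
          (PySem.List.pyGetD ys b1 0 + PySem.List.pyGetD ys (b2 - 1) 0) 2)
        ((b : Int) :: (PySem.List.pyRange (k : Int) (ys.length : Int) 1).filter
          (fun i => decide (g < PySem.List.pyGetD ys i 0 - PySem.List.pyGetD ys (i - 1) 0))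
          ++ [(ys.length : Int)])
      = goSpec g start prev t := by
  intro t
  induction t with
  | nil =>
    intro k hk hkle hdrop b start prev hb hprev
    have hlen : ys.length ≤ k := by
      have := congrArg List.length hdrop
      simp at this
      omega
    rw [PySem.List.pyRange_one_eq_nil (by exact_mod_cast hlen)]
    have e1 : PySem.List.pyGetD ys ((b : Nat) : Int) 0 = start := by
      rw [PySem.List.pyGetD_natCast]; exact hb
    have e2 : PySem.List.pyGetD ys ((ys.length : Int) - 1) 0 = prev := by
      have : (ys.length : Int) - 1 = ((k - 1 : Nat) : Int) := by omega
      rw [this, PySem.List.pyGetD_natCast]; exact hprev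
    simp [pairMap, goSpec, e1, e2]
  | cons y t' ih =>
    intro k hk hkle hdrop b start prev hb hprev
    have hklt : k < ys.length := length_of_drop_cons ys k y t' hdrop
    rw [PySem.List.pyRange_one_cons (by exact_mod_cast hklt)]
    have hyk : PySem.List.pyGetD ys (k : Int) 0 = y := by
      rw [PySem.List.pyGetD_natCast]; exact getD_of_drop ys k y t' hdrop
    have hykm : PySem.List.pyGetD ys ((k : Int) - 1) 0 = prev := by
      have : (k : Int) - 1 = ((k - 1 : Nat) : Int) := by omega
      rw [this, PySem.List.pyGetD_natCast]; exact hprev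
    have hdrop' : ys.drop (k + 1) = t' := by
      rw [← List.drop_drop, hdrop]; rfl
    have hkc : (k : Int) + 1 = ((k + 1 : Nat) : Int) := by omega
    simp only [List.filter_cons, hyk, hykm]
    by_cases hc : y - prev ≤ g
    · rw [if_neg (by simpa using (by omega : ¬ g < y - prev))]
      rw [hkc]
      rw [show goSpec g start prev (y :: t') = goSpec g start y t' by
        simp only [goSpec, if_pos hc]]
      exact ih (k + 1) (by omega) (by omega) hdrop' b start y hb
        (by simpa using getD_of_drop ys k y t' hdrop)
    · rw [if_pos (by simpa using (by omega : g < y - prev))]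
      simp only [List.cons_append, pairMap]
      rw [show goSpec g start prev (y :: t') =
          PySem.Int.floordiv (start + prev) 2 :: goSpec g y y t' by
        simp only [goSpec, if_neg hc]]
      rw [hkc]
      congr 1
      · rw [PySem.List.pyGetD_natCast, hb, hykm]
      · exact ih (k + 1) (by omega) (by omega) hdrop' k y y
          (getD_of_drop ys k y t' hdrop)
          (by simpa using getD_of_drop ys k y t' hdrop)

-- B's second comprehension over index pairs of `bounds` is `pairMap`.
theorem map_range_pairs (f : Int → Int → Int) :
    ∀ (bs : List Int),
      (PySem.List.pyRange 0 ((bs.length : Int) - 1) 1).map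
        (fun k => f (PySem.List.pyGetD bs k 0) (PySem.List.pyGetD bs (k + 1) 0))
      = pairMap f bs := by
  intro bs
  induction bs with
  | nil => rw [PySem.List.pyRange_one_eq_nil (by simp)]; rfl
  | cons b1 rest ih =>
    cases rest with
    | nil => rw [PySem.List.pyRange_one_eq_nil (by simp)]; rfl
    | cons b2 bs' =>
      have hlen : ((b1 :: b2 :: bs').length : Int) - 1 = ((b2 :: bs').length : Int) := by
        simp
      rw [hlen]
      rw [PySem.List.pyRange_one_cons (by exact_mod_cast (b2 :: bs').length_pos_of_ne_nil (by simp))]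
      simp only [List.map_cons, pairMap, zero_add]
      have hsh : ∀ j : Nat,
          f (PySem.List.pyGetD (b1 :: b2 :: bs') (1 + (j : Int)) 0)
            (PySem.List.pyGetD (b1 :: b2 :: bs') (1 + (j : Int) + 1) 0)
          = f (PySem.List.pyGetD (b2 :: bs') ((j : Int)) 0)
              (PySem.List.pyGetD (b2 :: bs') ((j : Int) + 1) 0) := by
        intro j
        have h2 : (1 : Int) + j + 1 = ((j + 2 : Nat) : Int) := by omega
        have h1 : (1 : Int) + j = ((j + 1 : Nat) : Int) := by omega
        have h3 : ((j : Int) + 1) = ((j + 1 : Nat) : Int) := by omega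
        rw [h2, h1, h3, PySem.List.pyGetD_natCast, PySem.List.pyGetD_natCast,
          PySem.List.pyGetD_natCast, PySem.List.pyGetD_natCast]
        simp
      have htail : (PySem.List.pyRange 1 ((b2 :: bs').length : Int) 1).map
            (fun k => f (PySem.List.pyGetD (b1 :: b2 :: bs') k 0)
              (PySem.List.pyGetD (b1 :: b2 :: bs') (k + 1) 0))
          = pairMap f (b2 :: bs') := by
        rw [← ih]
        rw [PySem.List.pyRange_one 1 ((b2 :: bs').length : Int),
          PySem.List.pyRange_one 0 (((b2 :: bs').length : Int) - 1)]
        simp only [List.map_map, Int.sub_zero]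
        apply List.map_congr_left
        intro j hj
        simpa using hsh j
      rw [htail]
      have hhead : f (PySem.List.pyGetD (b1 :: b2 :: bs') 0 0)
          (PySem.List.pyGetD (b1 :: b2 :: bs') 1 0) = f b1 b2 := by
        norm_num [PySem.List.pyGetD_ofNat']
      rw [hhead]

-- ===== VERDICT (by name: the statement is the Claim_ definition above) =====
theorem process_purple_markers_spec : Claim_equal_process_purple_markers := by
  unfold Claim_equal_process_purple_markers
  intro ys g _
  unfold Spec_process_purple_markers
  cases ys with
  | nil => rfl
  | cons y0 t =>
    unfold process_purple_markers process_purple_markers_alt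
    rw [if_neg (by simp), if_neg (by simp)]
    simp only []
    have h0 : PySem.List.pyGetD (y0 :: t) 0 0 = y0 := by
      norm_num [PySem.List.pyGetD_ofNat']
    rw [h0]
    have hA := A_loop g (y0 :: t) t 1 (le_refl 1) rfl [] [y0] y0 y0 rfl rfl rfl
    simp only [Nat.cast_one, List.map_nil, List.nil_append] at hA
    have hB := B_loop g (y0 :: t) t 1 (le_refl 1) (by simp) rfl 0 y0 y0 rfl rfl
    simp only [Nat.cast_one, Nat.cast_zero] at hB
    have hmap := map_range_pairs
      (fun b1 b2 => PySem.Int.floordiv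
        (PySem.List.pyGetD (y0 :: t) b1 0 + PySem.List.pyGetD (y0 :: t) (b2 - 1) 0) 2)
      ((0 : Int) :: (PySem.List.pyRange 1 (((y0 :: t).length : Nat) : Int) 1).filter
        (fun i => decide (g < PySem.List.pyGetD (y0 :: t) i 0
          - PySem.List.pyGetD (y0 :: t) (i - 1) 0)) ++ [(((y0 :: t).length : Nat) : Int)])
    simp only [List.cons_append] at hB hmap ⊢
    rw [hA, hmap, hB]
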